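-- pv_equiv track=rewrite | github.com/taxijjang/algorithm | 2020쿠팡/1번.py | solution
-- ===== SOURCE A (Python) =====
-- def solution(N):
--     answer = []
--     for K in range(2,10):
--         digit_num = digit(N,K)
--         res = digit_mul(digit_num)
--         answer.append([K, res])
--
--     answer.sort(key=lambda x : (-x[1], -x[0]))
--     return answer[0]
--
-- def digit(N, K):
--     '''진법으로 변환'''
--     num = ""
--     while N >= 1:
--         num = str(N % K) + num
--         N = N // K
--     return num
--
-- def digit_mul(digit_n):
--     '''자릿수 곱하기'''
--     res = 1
--     for n in digit_n:
--         n = int(n)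
--         res = res * n if n !=0 else res
--
--     return res
-- ===== SOURCE B (Python) =====
-- def solution(N):
--     best = None
--     for K in range(2, 10):
--         n, prod = N, 1
--         while n > 0:
--             d = n % K
--             if d:
--                 prod *= d
--             n //= K
--         if best is None or prod >= best[1]:
--             best = (K, prod)
--     return [best[0], best[1]]
-- ===== Notes on version B (the rewrite author's own statement) =====
-- stated objective: simpler
-- what changed: Replaces the string base-conversion helper, the per-character int() product and the sort of all eight [K,res] pairs by a single loop over bases 2-9 that computes the product of nonzero base-K digits arithmetically (n % K, n //= K) and keeps a running best pair, updating on >= so later (larger) bases win ties exactly as A's sort key (-res,-K) does.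
import Mathlib
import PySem

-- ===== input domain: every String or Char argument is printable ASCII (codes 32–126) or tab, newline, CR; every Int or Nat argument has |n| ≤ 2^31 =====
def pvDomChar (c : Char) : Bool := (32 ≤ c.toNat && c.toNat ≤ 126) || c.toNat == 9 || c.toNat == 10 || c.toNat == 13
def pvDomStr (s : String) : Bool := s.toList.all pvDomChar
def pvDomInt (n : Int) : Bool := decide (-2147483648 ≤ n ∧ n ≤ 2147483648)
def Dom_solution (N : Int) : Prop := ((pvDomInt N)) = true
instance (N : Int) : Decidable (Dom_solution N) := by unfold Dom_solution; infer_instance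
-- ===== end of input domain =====

-- B replaces A's string base-conversion, per-character int() product and sort of the
-- eight [K, res] pairs by one arithmetic digit loop per base and a running best pair
-- (objective: simpler).

-- ===== PORT A =====
-- digit(N, K): builds the base-K numeral as characters, most significant first.
-- The Python 'while N >= 1' loop is ported with fuel N.toNat + 1, which strictly
-- exceeds the iteration count for every K ≥ 2 (each step at least halves N).
def digitA : Nat → Int → Int → List Char → List Char
  | 0, _, _, num => num
  | fuel + 1, N, K, num =>
      if N ≥ 1 then
        digitA fuel (PySem.Int.floordiv N K) K (PySem.Int.toChars (PySem.Int.mod N K) ++ num)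
      else num

-- digit_mul(digit_n): res = res * int(n) if int(n) != 0 else res, over the characters.
-- int(n) on a single digit character is PySem.Int.ofChars? [c]; it never fails here,
-- so the .getD 0 default is unreachable.
def digitMulA (cs : List Char) : Int :=
  cs.foldl (fun res c =>
    if (PySem.Int.ofChars? [c]).getD 0 ≠ 0 then res * (PySem.Int.ofChars? [c]).getD 0 else res) 1

def solution (N : Int) : List Int :=
  let answer := (PySem.List.pyRange 2 10 1).foldl
    (fun ans K => ans ++ [[K, digitMulA (digitA (N.toNat + 1) N K [])]]) ([] : List (List Int))
  let sortedAns := PySem.List.sorted2 answer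
    (fun x => -(PySem.List.pyGetD x 1 0)) (fun x => -(PySem.List.pyGetD x 0 0)) false
  -- answer[0]: the sorted list has eight elements, index 0 is in range; [] is unreachable
  (PySem.List.pyGet? sortedAns 0).getD []

-- ===== PORT B =====
-- while n > 0: d = n % K; if d: prod *= d; n //= K   (same fuel bound as A's loop)
def prodLoopB : Nat → Int → Int → Int → Int
  | 0, _, _, prod => prod
  | fuel + 1, n, K, prod =>
      if n > 0 then
        prodLoopB fuel (PySem.Int.floordiv n K) K
          (if PySem.Int.mod n K ≠ 0 then prod * PySem.Int.mod n K else prod)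
      else prod

def solution_alt (N : Int) : List Int :=
  let best := (PySem.List.pyRange 2 10 1).foldl
    (fun best K =>
      match best with
      | none => some (K, prodLoopB (N.toNat + 1) N K 1)
      | some b => if prodLoopB (N.toNat + 1) N K 1 ≥ b.2
                  then some (K, prodLoopB (N.toNat + 1) N K 1) else some b)
    (none : Option (Int × Int))
  -- best is never None after the loop over range(2, 10); [] is unreachable
  match best with
  | some b => [b.1, b.2]
  | none => []

-- ===== PRECONDITION & SPEC =====
def Spec_solution (N : Int) (out : List Int) : Prop := out = solution_alt N
instance (N : Int) (out : List Int) : Decidable (Spec_solution N out) := by unfold Spec_solution; infer_instance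

-- ===== CLAIM (what is proved, stated in full; the proofs are below) =====
def Claim_equal_solution : Prop := ∀ (N : Int), Dom_solution N → Spec_solution N (solution N)

-- ===== LEMMAS AND PROOFS =====

-- proof-side abbreviations (defeq to subterms of the two ports)
def pfv (N K : Int) : Int := prodLoopB (N.toNat + 1) N K 1

def gA (N K : Int) : List Int := [K, digitMulA (digitA (N.toNat + 1) N K [])]

-- the comparator PySem.List.sorted2 uses for A's key pair (-res, -K)
def cmpA (a b : List Int) : Bool :=
  decide ((-(PySem.List.pyGetD a 1 0)) < -(PySem.List.pyGetD b 1 0)) ||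
  (!decide ((-(PySem.List.pyGetD b 1 0)) < -(PySem.List.pyGetD a 1 0)) &&
    decide ((-(PySem.List.pyGetD a 0 0)) < -(PySem.List.pyGetD b 0 0)))

-- A's digit_mul step function, named for the proofs
def stepA (res : Int) (c : Char) : Int :=
  if (PySem.Int.ofChars? [c]).getD 0 ≠ 0 then res * (PySem.Int.ofChars? [c]).getD 0 else res

-- folding A's step over the one-character numeral of a digit 0..8
lemma foldl_stepA_toChars (d m : Int) (h0 : 0 ≤ d) (h8 : d ≤ 8) :
    (PySem.Int.toChars d).foldl stepA m = if d ≠ 0 then m * d else m := by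
  interval_cases d <;>
    simp only [show PySem.Int.toChars 0 = ['0'] from by decide,
      show PySem.Int.toChars 1 = ['1'] from by decide,
      show PySem.Int.toChars 2 = ['2'] from by decide,
      show PySem.Int.toChars 3 = ['3'] from by decide,
      show PySem.Int.toChars 4 = ['4'] from by decide,
      show PySem.Int.toChars 5 = ['5'] from by decide,
      show PySem.Int.toChars 6 = ['6'] from by decide,
      show PySem.Int.toChars 7 = ['7'] from by decide,
      show PySem.Int.toChars 8 = ['8'] from by decide,
      List.foldl_cons, List.foldl_nil, stepA,
      show (PySem.Int.ofChars? ['0']).getD 0 = 0 from by decide,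
      show (PySem.Int.ofChars? ['1']).getD 0 = 1 from by decide,
      show (PySem.Int.ofChars? ['2']).getD 0 = 2 from by decide,
      show (PySem.Int.ofChars? ['3']).getD 0 = 3 from by decide,
      show (PySem.Int.ofChars? ['4']).getD 0 = 4 from by decide,
      show (PySem.Int.ofChars? ['5']).getD 0 = 5 from by decide,
      show (PySem.Int.ofChars? ['6']).getD 0 = 6 from by decide,
      show (PySem.Int.ofChars? ['7']).getD 0 = 7 from by decide,
      show (PySem.Int.ofChars? ['8']).getD 0 = 8 from by decide]

-- scaling the accumulator commutes with B's loop
lemma prodLoopB_scale : ∀ (f : Nat) (n K a r : Int),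
    prodLoopB f n K (a * r) = a * prodLoopB f n K r := by
  intro f
  induction f with
  | zero => intro n K a r; rfl
  | succ f ih =>
      intro n K a r
      by_cases hn : n > 0
      · simp only [prodLoopB, if_pos hn]
        split_ifs with hd
        · rw [mul_assoc, ih]
        · rw [ih]
      · simp only [prodLoopB, if_neg hn]

-- the key bridge: A's digit-string product loop equals B's arithmetic product loop
lemma foldl_digitA_eq (K : Int) (hK2 : 2 ≤ K) (hK9 : K ≤ 9) :
    ∀ (f : Nat) (N : Int) (acc : List Char) (r : Int),
      (digitA f N K acc).foldl stepA r = acc.foldl stepA (prodLoopB f N K r) := by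
  intro f
  induction f with
  | zero => intro N acc r; rfl
  | succ f ih =>
      intro N acc r
      by_cases hN : N ≥ 1
      · have hN' : N > 0 := by omega
        simp only [digitA, prodLoopB, if_pos hN, if_pos hN']
        rw [ih, List.foldl_append]
        have hd0 : 0 ≤ PySem.Int.mod N K := PySem.Int.mod_nonneg N (by omega)
        have hd8 : PySem.Int.mod N K ≤ 8 := by
          have := PySem.Int.mod_lt N (b := K) (by omega)
          omega
        rw [foldl_stepA_toChars _ _ hd0 hd8]
        split_ifs with hd
        · rw [show r * PySem.Int.mod N K = PySem.Int.mod N K * r by ring, prodLoopB_scale,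
            show PySem.Int.mod N K * prodLoopB f (PySem.Int.floordiv N K) K r
               = prodLoopB f (PySem.Int.floordiv N K) K r * PySem.Int.mod N K by ring]
        · rfl
      · have hN' : ¬ N > 0 := by omega
        simp only [digitA, prodLoopB, if_neg hN, if_neg hN']

lemma prod_eq (N K : Int) (hK2 : 2 ≤ K) (hK9 : K ≤ 9) :
    digitMulA (digitA (N.toNat + 1) N K []) = prodLoopB (N.toNat + 1) N K 1 := by
  show (digitA (N.toNat + 1) N K []).foldl stepA 1 = _
  rw [foldl_digitA_eq K hK2 hK9]
  rfl

lemma gA_eq (N K : Int) (hK2 : 2 ≤ K) (hK9 : K ≤ 9) : gA N K = [K, pfv N K] := by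
  unfold gA pfv
  rw [prod_eq N K hK2 hK9]

-- head of a fold of insertBy is the running "best" under the comparator
lemma head_foldl_insertBy {α : Type} (before : α → α → Bool) :
    ∀ (xs : List α) (h : α) (t : List α),
      ((xs.foldl (fun acc x => PySem.List.insertBy before x acc) (h :: t))).head? =
        some (xs.foldl (fun m x => if before x m then x else m) h) := by
  intro xs
  induction xs with
  | nil => intro h t; rfl
  | cons x rest ih =>
      intro h t
      simp only [List.foldl_cons, PySem.List.insertBy]
      split_ifs with hb
      · exact ih x (h :: t)
      · exact ih h (PySem.List.insertBy before x t)

-- pyGet? at index 0 is head?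
lemma pyGet?_zero {α : Type} (xs : List α) : PySem.List.pyGet? xs 0 = xs.head? := by
  cases xs <;> simp [PySem.List.pyGet?, PySem.List.pyIdx?]

-- cmpA on pairs with increasing K is exactly B's >= test
lemma cmpA_eq (K p Kb pb : Int) (h : Kb < K) : cmpA [K, p] [Kb, pb] = decide (pb ≤ p) := by
  show (decide (-p < -pb) || (!decide (-pb < -p) && decide (-K < -Kb))) = decide (pb ≤ p)
  have hK : decide (-K < -Kb) = true := decide_eq_true (by omega)
  rw [hK, Bool.and_true]
  by_cases hp : pb ≤ p
  · have h1 : decide (-pb < -p) = false := decide_eq_false (by omega)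
    rw [h1]
    simp [hp]
  · have h1 : decide (-p < -pb) = false := decide_eq_false (by omega)
    have h2 : decide (-pb < -p) = true := decide_eq_true (by omega)
    rw [h1, h2]
    simp [hp]

-- the running-min fold under the sort comparator is B's running-best fold,
-- provided the bases are strictly increasing
lemma foldSel (N : Int) :
    ∀ (Ks : List Int) (Kh ph : Int),
      (∀ K ∈ Ks, Kh < K ∧ gA N K = [K, pfv N K]) → Ks.Pairwise (· < ·) →
      Ks.foldl (fun m K => if cmpA (gA N K) m then gA N K else m) [Kh, ph]
        = (fun b : Int × Int => [b.1, b.2])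
            (Ks.foldl (fun b K => if pfv N K ≥ b.2 then (K, pfv N K) else b) (Kh, ph)) := by
  intro Ks
  induction Ks with
  | nil => intro Kh ph _ _; rfl
  | cons K rest ih =>
      intro Kh ph hall hpw
      obtain ⟨hlt, hg⟩ := hall K (List.mem_cons_self ..)
      simp only [List.foldl_cons, hg, cmpA_eq K (pfv N K) Kh ph hlt]
      rw [List.pairwise_cons] at hpw
      by_cases hp : ph ≤ pfv N K
      · rw [if_pos (by simpa using hp), if_pos (by simpa [ge_iff_le] using hp)]
        exact ih K (pfv N K)
          (fun K' hK' => ⟨hpw.1 K' hK', (hall K' (List.mem_cons_of_mem _ hK')).2⟩) hpw.2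
      · rw [if_neg (by simpa using hp), if_neg (by simpa [ge_iff_le] using hp)]
        exact ih Kh ph (fun K' hK' => ⟨(hall K' (List.mem_cons_of_mem _ hK')).1,
          (hall K' (List.mem_cons_of_mem _ hK')).2⟩) hpw.2

-- B's fold keeps a some-state and folds the pair
lemma optfold (pf : Int → Int) :
    ∀ (Ks : List Int) (b : Int × Int),
      Ks.foldl (fun best K =>
        match best with
        | none => some (K, pf K)
        | some b => if pf K ≥ b.2 then some (K, pf K) else some b) (some b)
      = some (Ks.foldl (fun b K => if pf K ≥ b.2 then (K, pf K) else b) b) := by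
  intro Ks
  induction Ks with
  | nil => intro b; rfl
  | cons K rest ih =>
      intro b
      simp only [List.foldl_cons]
      split_ifs with h
      · exact ih _
      · exact ih _

-- B's port, reduced to the plain pair fold
lemma hB (N : Int) :
    solution_alt N
      = (fun b : Int × Int => [b.1, b.2])
          (List.foldl (fun b K => if pfv N K ≥ b.2 then (K, pfv N K) else b)
            (2, pfv N 2) [3, 4, 5, 6, 7, 8, 9]) := by
  show (match (PySem.List.pyRange 2 10 1).foldl
      (fun best K =>
        match best with
        | none => some (K, pfv N K)
        | some b => if pfv N K ≥ b.2 then some (K, pfv N K) else some b)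
      (none : Option (Int × Int)) with
    | some b => [b.1, b.2]
    | none => []) = _
  rw [show PySem.List.pyRange 2 10 1 = 2 :: [3, 4, 5, 6, 7, 8, 9] from by decide,
    List.foldl_cons]
  show (match ([3, 4, 5, 6, 7, 8, 9].foldl
      (fun best K =>
        match best with
        | none => some (K, pfv N K)
        | some b => if pfv N K ≥ b.2 then some (K, pfv N K) else some b)
      (some (2, pfv N 2))) with
    | some b => [b.1, b.2]
    | none => []) = _
  rw [optfold (pfv N) [3, 4, 5, 6, 7, 8, 9] (2, pfv N 2)]

-- A's port, reduced to the running-min fold over the comparator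
lemma hA (N : Int) :
    solution N
      = List.foldl (fun m K => if cmpA (gA N K) m then gA N K else m)
          (gA N 2) [3, 4, 5, 6, 7, 8, 9] := by
  have hs : ∀ xs : List (List Int),
      PySem.List.sorted2 xs (fun x => -(PySem.List.pyGetD x 1 0))
        (fun x => -(PySem.List.pyGetD x 0 0)) false
      = List.foldl (fun acc x => PySem.List.insertBy cmpA x acc) [] xs := fun _ => rfl
  show (PySem.List.pyGet?
      (PySem.List.sorted2
        ((PySem.List.pyRange 2 10 1).foldl (fun ans K => ans ++ [gA N K]) [])
        (fun x => -(PySem.List.pyGetD x 1 0)) (fun x => -(PySem.List.pyGetD x 0 0)) false)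
      0).getD [] = _
  rw [PySem.List.foldl_append_singleton_eq_map (gA N) (PySem.List.pyRange 2 10 1) [],
    List.nil_append,
    show PySem.List.pyRange 2 10 1 = 2 :: [3, 4, 5, 6, 7, 8, 9] from by decide,
    List.map_cons, hs, List.foldl_cons,
    show PySem.List.insertBy cmpA (gA N 2) [] = [gA N 2] from rfl,
    pyGet?_zero, head_foldl_insertBy cmpA (List.map (gA N) [3, 4, 5, 6, 7, 8, 9]) (gA N 2) [],
    Option.getD_some, List.foldl_map]

-- ===== VERDICT (by name: the statement is the Claim_ definition above) =====
theorem solution_spec : Claim_equal_solution := by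
  intro N _hD
  show solution N = solution_alt N
  rw [hA, hB, gA_eq N 2 (by norm_num) (by norm_num)]
  refine foldSel N [3, 4, 5, 6, 7, 8, 9] 2 (pfv N 2) ?_ (by decide)
  intro K hK
  fin_cases hK <;>
    exact ⟨by norm_num, gA_eq N _ (by norm_num) (by norm_num)⟩
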